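-- pv_equiv track=rewrite | github.com/SL5TaskForce/IL6-control-catalog | classified_information/superseded/classified_information_overlay_extractor.py | _extract_attribute_from_line
-- ===== SOURCE A (Python) =====
-- def _extract_attribute_from_line(line_text: str):
--     """
--     If line starts with a known attribute, return (attribute_name, content).
--     """
--     known_attributes = [
--         "Justification to Select",
--         "Supplemental Guidance",
--         "Parameter Value(s)",
--         "Parameter Value",
--         "Regulatory/Statutory Reference(s)",
--         "Control Extension",
--         "Control Extension(s)",
--         "Control Extension and Parameter Value(s)"
--     ]
--     for attr in known_attributes:
--         if line_text.startswith(attr + ":"):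
--             content = line_text[len(attr) + 1:].strip()
--             return attr, content
--     return None
-- ===== SOURCE B (Python) =====
-- _KNOWN_ATTRIBUTES = frozenset([
--     "Justification to Select",
--     "Supplemental Guidance",
--     "Parameter Value(s)",
--     "Parameter Value",
--     "Regulatory/Statutory Reference(s)",
--     "Control Extension",
--     "Control Extension(s)",
--     "Control Extension and Parameter Value(s)",
-- ])
--
--
-- def _extract_attribute_from_line(line_text: str):
--     """
--     If line starts with a known attribute, return (attribute_name, content).
--     """
--     prefix, sep, rest = line_text.partition(":")
--     if sep and prefix in _KNOWN_ATTRIBUTES: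
--         return prefix, rest.strip()
--     return None
-- ===== Notes on version B (the rewrite author's own statement) =====
-- stated objective: simpler
-- what changed: Replaces the per-attribute startswith loop by parsing the line once: partition on the first ':' and one frozenset membership test on the prefix (correct because no attribute contains ':', so a match forces the prefix before the first colon to be exactly the attribute).
import Mathlib
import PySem

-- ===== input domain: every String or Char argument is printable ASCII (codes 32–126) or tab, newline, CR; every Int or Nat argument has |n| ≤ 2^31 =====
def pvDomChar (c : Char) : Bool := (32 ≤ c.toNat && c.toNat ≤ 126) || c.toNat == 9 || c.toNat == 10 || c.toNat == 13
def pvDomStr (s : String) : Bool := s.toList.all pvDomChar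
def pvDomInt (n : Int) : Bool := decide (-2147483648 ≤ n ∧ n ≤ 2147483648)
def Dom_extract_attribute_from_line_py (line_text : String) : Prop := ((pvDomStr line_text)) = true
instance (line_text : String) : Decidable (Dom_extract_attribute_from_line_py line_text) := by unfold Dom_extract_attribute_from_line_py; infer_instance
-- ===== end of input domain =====

-- B replaces A's per-attribute startswith loop by one partition at the first ':'
-- plus a single set membership test on the prefix (objective: simpler).

-- ===== PORT A =====
def pvKnownAttrs : List String := [
  "Justification to Select",
  "Supplemental Guidance",
  "Parameter Value(s)",
  "Parameter Value",
  "Regulatory/Statutory Reference(s)",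
  "Control Extension",
  "Control Extension(s)",
  "Control Extension and Parameter Value(s)"]

-- the 'for attr in known_attributes' loop
def pvALoop (line_text : String) : List String → Option (String × String)
  | [] => none
  | attr :: rest =>
    if PySem.Str.startswith line_text (attr ++ ":") then
      some (attr, PySem.Str.strip
        (PySem.Str.slice line_text (some ((PySem.Str.len attr : Int) + 1)) none))
    else pvALoop line_text rest

def extract_attribute_from_line_py (line_text : String) : Option (String × String) :=
  pvALoop line_text pvKnownAttrs

-- ===== PORT B =====
def pvKnownSet : PySem.Set String := PySem.Set.ofList [
  "Justification to Select",
  "Supplemental Guidance",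
  "Parameter Value(s)",
  "Parameter Value",
  "Regulatory/Statutory Reference(s)",
  "Control Extension",
  "Control Extension(s)",
  "Control Extension and Parameter Value(s)"]

-- line_text.partition(":") ported by hand (no PySem primitive): the first ':' is
-- found and the string sliced around it — exact: str.partition splits at the
-- FIRST occurrence, and its 'sep' component is empty iff find returns -1.
def extract_attribute_from_line_py_alt (line_text : String) : Option (String × String) :=
  let i := PySem.Str.find line_text ":"
  if i = -1 then none
  else
    let pre := PySem.Str.slice line_text none (some i)
    let rest := PySem.Str.slice line_text (some (i + 1)) none
    if PySem.Set.contains pvKnownSet pre then some (pre, PySem.Str.strip rest)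
    else none

-- ===== PRECONDITION & SPEC =====
def Spec_extract_attribute_from_line_py (line_text : String) (out : Option (String × String)) : Prop := out = extract_attribute_from_line_py_alt line_text
instance (line_text : String) (out : Option (String × String)) : Decidable (Spec_extract_attribute_from_line_py line_text out) := by unfold Spec_extract_attribute_from_line_py; infer_instance

-- ===== CLAIM (what is proved, stated in full; the proofs are below) =====
def Claim_equal_extract_attribute_from_line_py : Prop := ∀ (line_text : String), Dom_extract_attribute_from_line_py line_text → Spec_extract_attribute_from_line_py line_text (extract_attribute_from_line_py line_text)

-- ===== LEMMAS AND PROOFS =====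

-- If s starts with a ++ [':'] and a contains no ':', the first ':' of s is at index a.length.
lemma pv_find_colon_of_prefix (a s : List Char) (hc : ':' ∉ a)
    (h : (a ++ [':']) <+: s) : PySem.Chars.find s [':'] = (a.length : Int) := by
  have h0 : 0 ≤ PySem.Chars.find s [':'] := (PySem.Chars.find_nonneg_iff s [':']).mpr
    (List.IsInfix.trans ⟨a, [], by simp⟩ h.isInfix)
  obtain ⟨hp, hmin⟩ := PySem.Chars.find_spec (s := s) (sub := [':']) h0
  obtain ⟨t, ht⟩ := h
  set j := (PySem.Chars.find s [':']).toNat with hj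
  have hdropa : [':'] <+: s.drop a.length := by
    refine ⟨t, ?_⟩
    rw [← ht, List.append_assoc, List.drop_left]
  have hj_le : j ≤ a.length := by
    by_contra hlt
    exact hmin a.length (by omega) hdropa
  have hj_ge : ¬ j < a.length := by
    intro hlt
    obtain ⟨u, hu⟩ := hp
    have hcolon : s[j]? = some ':' := by
      have h1 : (List.drop j s)[0]? = s[j + 0]? := List.getElem?_drop
      simp only [Nat.add_zero] at h1
      rw [← h1, ← hu]; simp
    have : a[j]? = some ':' := by
      rw [← ht, List.append_assoc] at hcolon
      rwa [List.getElem?_append_left hlt] at hcolon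
    exact hc (List.mem_of_getElem? this)
  have : j = a.length := by omega
  omega

-- If the first ':' of s is at index i, s splits as take i ++ ':' :: drop (i+1).
lemma pv_split_at_find (s : List Char) (i : Nat)
    (h : PySem.Chars.find s [':'] = (i : Int)) :
    s = s.take i ++ ':' :: s.drop (i + 1) := by
  have h0 : 0 ≤ PySem.Chars.find s [':'] := by omega
  obtain ⟨hp, -⟩ := PySem.Chars.find_spec (s := s) (sub := [':']) h0
  rw [h] at hp
  simp only [Int.toNat_natCast] at hp
  obtain ⟨u, hu⟩ := hp
  have hdrop : s.drop (i + 1) = u := by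
    have : (s.drop i).drop 1 = s.drop (i + 1) := List.drop_drop
    rw [← hu] at this
    simpa using this.symm
  conv_lhs => rw [← List.take_append_drop i s, ← hu]
  rw [hdrop]
  simp

-- B on a line that startswith attr + ":" (attr colon-free and known).
lemma pvB_match (s attr : String) (hc : ':' ∉ attr.toList)
    (hmem : PySem.Set.contains pvKnownSet attr = true)
    (h : PySem.Str.startswith s (attr ++ ":") = true) :
    extract_attribute_from_line_py_alt s =
      some (attr, PySem.Str.strip
        (PySem.Str.slice s (some ((PySem.Str.len attr : Int) + 1)) none)) := by
  have hpre : attr.toList ++ [':'] <+: s.toList := by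
    rw [PySem.Str.startswith_eq] at h
    have := (PySem.Chars.startswith_iff _ _).mp h
    simpa [String.toList_append] using this
  have hfind : PySem.Chars.find s.toList [':'] = (attr.toList.length : Int) :=
    pv_find_colon_of_prefix _ _ hc hpre
  have hfind' : PySem.Str.find s ":" = (attr.toList.length : Int) := by
    rw [PySem.Str.find_eq]; exact hfind
  have htake : PySem.Str.slice s none (some (attr.toList.length : Int)) = attr := by
    apply String.toList_inj.mp
    have h2 : (PySem.Str.slice s none (some (attr.toList.length : Int))).toList
        = PySem.List.slice s.toList none (some (attr.toList.length : Int)) := by simp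
    rw [h2, PySem.List.slice_to_natCast]
    exact (List.prefix_iff_eq_take.mp ((List.prefix_append attr.toList [':']).trans hpre)).symm
  simp only [extract_attribute_from_line_py_alt]
  rw [hfind', if_neg (by omega), htake, if_pos hmem]
  have hlen : (PySem.Str.len attr : Int) = (attr.toList.length : Int) := by simp
  rw [hlen]

-- a prefix-before-first-colon that equals attr forces startswith attr + ":".
lemma pv_match_of_take (s attr : String) (n : Nat)
    (hfind : PySem.Chars.find s.toList [':'] = (n : Int))
    (heq : PySem.Str.slice s none (some (n : Int)) = attr) :
    PySem.Str.startswith s (attr ++ ":") = true := by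
  have htake : s.toList.take n = attr.toList := by
    rw [← heq]
    have h2 : (PySem.Str.slice s none (some (n : Int))).toList
        = PySem.List.slice s.toList none (some (n : Int)) := by simp
    rw [h2, PySem.List.slice_to_natCast]
  have hsplit := pv_split_at_find s.toList n hfind
  rw [htake] at hsplit
  rw [PySem.Str.startswith_eq, PySem.Chars.startswith_iff]
  refine ⟨s.toList.drop (n + 1), ?_⟩
  rw [String.toList_append]
  show attr.toList ++ [':'] ++ s.toList.drop (n + 1) = s.toList
  rw [List.append_assoc]
  exact hsplit.symm

-- B on a line matching no known attribute.
lemma pvB_nomatch (s : String)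
    (h : ∀ attr ∈ pvKnownAttrs, PySem.Str.startswith s (attr ++ ":") = false) :
    extract_attribute_from_line_py_alt s = none := by
  simp only [extract_attribute_from_line_py_alt]
  by_cases hi : PySem.Str.find s ":" = -1
  · rw [if_pos hi]
  · rw [if_neg hi]
    have he : PySem.Str.find s ":" = PySem.Chars.find s.toList [':'] :=
      PySem.Str.find_eq s ":"
    have h0 : 0 ≤ PySem.Str.find s ":" := by
      have := PySem.Chars.neg_one_le_find s.toList [':']
      omega
    have hcast : PySem.Str.find s ":" = (((PySem.Str.find s ":").toNat : Nat) : Int) := by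
      omega
    have hfind : PySem.Chars.find s.toList [':']
        = (((PySem.Str.find s ":").toNat : Nat) : Int) := by
      omega
    cases hcb : PySem.Set.contains pvKnownSet
        (PySem.Str.slice s none (some (PySem.Str.find s ":"))) with
    | false => simp
    | true =>
      exfalso
      have hmem := List.mem_of_elem_eq_true hcb
      have hset : pvKnownSet = pvKnownAttrs := by decide
      rw [hset] at hmem
      have hsw : PySem.Str.startswith s
          ((PySem.Str.slice s none (some (PySem.Str.find s ":"))) ++ ":") = true := by
        rw [hcast]
        exact pv_match_of_take s _ _ hfind rfl
      have hf := h _ hmem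
      rw [hf] at hsw
      exact Bool.noConfusion hsw

-- ===== VERDICT (by name: the statement is the Claim_ definition above) =====
theorem extract_attribute_from_line_py_spec : Claim_equal_extract_attribute_from_line_py := by
  intro s _
  show extract_attribute_from_line_py s = extract_attribute_from_line_py_alt s
  simp only [extract_attribute_from_line_py, pvKnownAttrs, pvALoop]
  split_ifs with h1 h2 h3 h4 h5 h6 h7 h8
  · exact (pvB_match s "Justification to Select" (by decide) (by decide) h1).symm
  · exact (pvB_match s "Supplemental Guidance" (by decide) (by decide) h2).symm
  · exact (pvB_match s "Parameter Value(s)" (by decide) (by decide) h3).symm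
  · exact (pvB_match s "Parameter Value" (by decide) (by decide) h4).symm
  · exact (pvB_match s "Regulatory/Statutory Reference(s)" (by decide) (by decide) h5).symm
  · exact (pvB_match s "Control Extension" (by decide) (by decide) h6).symm
  · exact (pvB_match s "Control Extension(s)" (by decide) (by decide) h7).symm
  · exact (pvB_match s "Control Extension and Parameter Value(s)" (by decide) (by decide) h8).symm
  · refine (pvB_nomatch s ?_).symm
    intro attr hm
    simp only [pvKnownAttrs, List.mem_cons, List.not_mem_nil, or_false] at hm
    rcases hm with rfl | rfl | rfl | rfl | rfl | rfl | rfl | rfl <;>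
      simp_all
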